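-- pv_equiv track=rewrite | github.com/yrlihuan/chat_with_llm | scripts/html_utils.py | remove_duplicated_lines
-- ===== SOURCE A (Python) =====
-- import collections
--
-- def remove_duplicated_lines(contents, threshold, whitelist_prefixes=[]):
--     assert threshold > 1
--
--     # 通过统计多篇文章中出现的相同的行数来判断是否是多余的内容
--     line_duplicates_cnt = collections.defaultdict(list)
--     lines = []
--     for line in contents.split('\n'):
--         if line.strip():
--             lines.append(line)
--             line_duplicates_cnt[line].append(len(lines) - 1)
--         else:
--             lines.append('')
--
--     boilerplate_lines = set()
--     for line, indices in line_duplicates_cnt.items():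
--         if len(indices) >= threshold and not any(line.startswith(prefix) for prefix in whitelist_prefixes):
--             boilerplate_lines.update(indices)
--
--     lines = [line for i, line in enumerate(lines) if i not in boilerplate_lines]
--
--     # 将三个以上的空行替换为两个空行
--     empty_lines = set()
--     empty_line_start = -1
--     for l_ind, l in enumerate(lines):
--         if l:
--             if empty_line_start >= 0 and l_ind - empty_line_start > 2:
--                 empty_lines.update(range(empty_line_start + 2, l_ind))
--
--             empty_line_start = -1
--         else:
--             if empty_line_start < 0:
--                 empty_line_start = l_ind
--
--     if empty_line_start >= 0 and len(lines) - empty_line_start > 2: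
--         empty_lines.update(range(empty_line_start + 2, len(lines)))
--
--     lines = [line for i, line in enumerate(lines) if i not in empty_lines]
--
--     contents = '\n'.join(lines)
--
--     return contents
-- ===== SOURCE B (Python) =====
-- import collections
--
-- def remove_duplicated_lines(contents, threshold, whitelist_prefixes=[]):
--     assert threshold > 1
--
--     raw = contents.split('\n')
--     # classify: count every non-blank line's content once
--     counts = collections.Counter(l for l in raw if l.strip())
--
--     def is_boilerplate(line):
--         return counts[line] >= threshold and not any(line.startswith(p) for p in whitelist_prefixes)
--
--     # single streaming pass: drop boilerplate lines (without resetting the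
--     # blank-run counter) and keep at most two blanks per run
--     out = []
--     blanks = 0
--     for line in raw:
--         if not line.strip():
--             if blanks < 2:
--                 out.append('')
--             blanks += 1
--         elif is_boilerplate(line):
--             pass
--         else:
--             out.append(line)
--             blanks = 0
--
--     return '\n'.join(out)
-- ===== Notes on version B (the rewrite author's own statement) =====
-- stated objective: simpler
-- what changed: Replaces A's two index-set constructions (dict of index lists -> boilerplate index set, then a blank-run index set) and two enumerate-filter passes with a Counter classifying line contents once plus a single streaming pass that keeps a consecutive-blank counter.
import Mathlib
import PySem

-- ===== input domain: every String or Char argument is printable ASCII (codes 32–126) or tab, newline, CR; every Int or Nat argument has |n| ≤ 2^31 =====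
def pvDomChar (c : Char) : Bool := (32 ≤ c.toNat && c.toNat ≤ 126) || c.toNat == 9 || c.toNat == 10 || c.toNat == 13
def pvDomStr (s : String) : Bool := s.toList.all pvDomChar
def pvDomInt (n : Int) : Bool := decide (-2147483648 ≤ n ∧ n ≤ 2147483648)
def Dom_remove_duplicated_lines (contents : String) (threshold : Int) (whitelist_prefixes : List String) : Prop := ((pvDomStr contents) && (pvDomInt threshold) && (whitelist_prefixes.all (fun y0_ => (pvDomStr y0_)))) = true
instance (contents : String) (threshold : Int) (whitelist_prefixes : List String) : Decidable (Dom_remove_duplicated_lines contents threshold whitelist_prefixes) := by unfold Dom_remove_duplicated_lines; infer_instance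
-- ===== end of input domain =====

-- B replaces A's two index-set constructions and two enumerate/filter passes by a Counter
-- classifying line contents once plus one streaming pass with a consecutive-blank counter (simpler).

-- ===== PORT A =====
def remove_duplicated_lines (contents : String) (threshold : Int) (whitelist_prefixes : List String) : String :=
  -- assert threshold > 1 : Python raises AssertionError when threshold ≤ 1; excluded by Pre_.
  let st := ((PySem.Str.split? contents "\n").getD []).foldl
      (fun (st : PySem.Dict String (List Int) × List String) line =>
        if PySem.Str.strip line ≠ "" then
          (st.1.modify line [] (fun v => v ++ [((st.2 ++ [line]).length : Int) - 1]), st.2 ++ [line])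
        else (st.1, st.2 ++ [""]))
      (PySem.Dict.empty, [])
  let boiler : PySem.Set Int := st.1.items.foldl
      (fun s p =>
        if threshold ≤ (p.2.length : Int) ∧ (whitelist_prefixes.any (fun pre => PySem.Str.startswith p.1 pre)) = false
        then s.update p.2 else s)
      PySem.Set.empty
  let lines1 := ((PySem.List.enumerate st.2 0).filter (fun q => !(boiler.contains q.1))).map (fun q => q.2)
  let st2 := (PySem.List.enumerate lines1 0).foldl
      (fun (st : PySem.Set Int × Int) q =>
        if q.2 ≠ "" then
          ((if 0 ≤ st.2 ∧ 2 < q.1 - st.2 then st.1.update (PySem.List.pyRange (st.2 + 2) q.1 1) else st.1), -1)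
        else (st.1, if st.2 < 0 then q.1 else st.2))
      (PySem.Set.empty, -1)
  let empties := if 0 ≤ st2.2 ∧ 2 < (lines1.length : Int) - st2.2
      then st2.1.update (PySem.List.pyRange (st2.2 + 2) (lines1.length : Int) 1) else st2.1
  let lines2 := ((PySem.List.enumerate lines1 0).filter (fun q => !(empties.contains q.1))).map (fun q => q.2)
  PySem.Str.join "\n" lines2

-- ===== PORT B =====
def remove_duplicated_lines_alt (contents : String) (threshold : Int) (whitelist_prefixes : List String) : String :=
  -- assert threshold > 1 (as in Source B)
  let raw := (PySem.Str.split? contents "\n").getD []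
  let counts := PySem.Dict.counter (raw.filter (fun l => PySem.Str.strip l != ""))
  let st := raw.foldl
      (fun (st : List String × Nat) line =>
        if PySem.Str.strip line = "" then
          ((if st.2 < 2 then st.1 ++ [""] else st.1), st.2 + 1)
        else if threshold ≤ counts.getD line 0 ∧ (whitelist_prefixes.any (fun pre => PySem.Str.startswith line pre)) = false then
          st
        else (st.1 ++ [line], 0))
      ([], 0)
  PySem.Str.join "\n" st.1

-- ===== PRECONDITION & SPEC =====
-- Pre_ excludes threshold ≤ 1, where Python A (and B) raise AssertionError.
def Pre_remove_duplicated_lines (contents : String) (threshold : Int) (whitelist_prefixes : List String) : Prop := 1 < threshold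
instance (contents : String) (threshold : Int) (whitelist_prefixes : List String) : Decidable (Pre_remove_duplicated_lines contents threshold whitelist_prefixes) := by unfold Pre_remove_duplicated_lines; infer_instance
def pvWitness_remove_duplicated_lines : String × Int × List String := ("dup\na\ndup\n\n\n\n\nb", 2, ["a"])

def Spec_remove_duplicated_lines (contents : String) (threshold : Int) (whitelist_prefixes : List String) (out : String) : Prop := out = remove_duplicated_lines_alt contents threshold whitelist_prefixes
instance (contents : String) (threshold : Int) (whitelist_prefixes : List String) (out : String) : Decidable (Spec_remove_duplicated_lines contents threshold whitelist_prefixes out) := by unfold Spec_remove_duplicated_lines; infer_instance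

-- ===== CLAIM (what is proved, stated in full; the proofs are below) =====
def Claim_equal_remove_duplicated_lines : Prop := ∀ (contents : String) (threshold : Int) (whitelist_prefixes : List String), Dom_remove_duplicated_lines contents threshold whitelist_prefixes → Pre_remove_duplicated_lines contents threshold whitelist_prefixes → Spec_remove_duplicated_lines contents threshold whitelist_prefixes (remove_duplicated_lines contents threshold whitelist_prefixes)

-- ===== LEMMAS AND PROOFS =====

def pvNorm (l : String) : String := if PySem.Str.strip l = "" then "" else l
def pvPos (c : String) : Int → List String → List Int
  | _, [] => []
  | n, y :: ys => (if y = c then [n] else []) ++ pvPos c (n + 1) ys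
def pvTB (xs : List String) : Nat := (xs.reverse.takeWhile (fun l => l == "")).length

theorem pvTB_append (xs : List String) (x : String) :
    pvTB (xs ++ [x]) = if x = "" then pvTB xs + 1 else 0 := by
  unfold pvTB
  simp [List.takeWhile_cons]
  split_ifs with h <;> simp [h]

theorem pvTB_le_length (xs : List String) : pvTB xs ≤ xs.length := by
  unfold pvTB
  calc _ ≤ xs.reverse.length := (List.takeWhile_sublist _).length_le
  _ = xs.length := by simp

theorem pvPos_mem (c : String) (ys : List String) : ∀ (n x : Int),
    x ∈ pvPos c n ys ↔ ∃ j : Nat, j < ys.length ∧ ys[j]? = some c ∧ x = n + j := by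
  induction ys with
  | nil => simp [pvPos]
  | cons y ys ih =>
    intro n x
    simp only [pvPos, List.mem_append, ih]
    constructor
    · rintro (h | ⟨j, hj, hc, rfl⟩)
      · refine ⟨0, by simp, ?_, ?_⟩
        · split_ifs at h with hy
          · simp_all
          · simp at h
        · split_ifs at h with hy <;> simp_all
      · exact ⟨j + 1, by simpa using hj, by simpa using hc, by push_cast; ring⟩
    · rintro ⟨j, hj, hc, rfl⟩
      cases j with
      | zero => left; simp_all
      | succ j =>
        right
        exact ⟨j, by simpa using hj, by simpa using hc, by push_cast; ring⟩

theorem pvPos_length (c : String) (ys : List String) : ∀ n, (pvPos c n ys).length = ys.count c := by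
  induction ys with
  | nil => simp [pvPos]
  | cons y ys ih =>
    intro n
    simp only [pvPos, List.length_append, ih, List.count_cons]
    by_cases h : y = c <;> simp [h, add_comm]

theorem pv_filter_raw (R : List String) :
    R.filter (fun l => PySem.Str.strip l != "") = (R.map pvNorm).filter (fun l => l != "") := by
  induction R with
  | nil => rfl
  | cons r R ih =>
    simp only [List.filter_cons, List.map_cons]
    by_cases h : PySem.Str.strip r = ""
    · simp [h, pvNorm, ih]
    · have hr : pvNorm r = r := by simp [pvNorm, h]
      have : r ≠ "" := by rintro rfl; exact h rfl
      simp [h, hr, this, ih]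

theorem pv_count_filter (R : List String) (l : String) (hl : l ≠ "") :
    (R.filter (fun l => PySem.Str.strip l != "")).count l = (R.map pvNorm).count l := by
  rw [pv_filter_raw]
  induction (R.map pvNorm) with
  | nil => rfl
  | cons y ys ih =>
    simp only [List.filter_cons, List.count_cons]
    by_cases h : y = ""
    · subst h; simp [Ne.symm hl, ih]
    · simp [h, List.count_cons, ih]

theorem pv_keys_modify_add {κ ν : Type} [BEq κ] [LawfulBEq κ] (d : PySem.Dict κ ν) (k : κ) (d0 : ν) (f : ν → ν) :
    (d.modify k d0 f).keys = PySem.Set.add d.keys k := by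
  rw [PySem.Dict.keys_modify]
  by_cases h : k ∈ d.keys
  · rw [PySem.Dict.keys_insert_of_contains, PySem.Set.add_of_mem h]
    rwa [PySem.Dict.contains_iff_mem_keys]
  · rw [PySem.Dict.keys_insert_of_not_contains, PySem.Set.add_of_not_mem h]
    rw [← Bool.not_eq_true, PySem.Dict.contains_iff_mem_keys]; exact h

theorem pv_foldA (R : List String) : ∀ (d0 : PySem.Dict String (List Int)) (ls0 : List String),
    (R.foldl
      (fun (st : PySem.Dict String (List Int) × List String) line =>
        if PySem.Str.strip line ≠ "" then
          (st.1.modify line [] (fun v => v ++ [((st.2 ++ [line]).length : Int) - 1]), st.2 ++ [line])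
        else (st.1, st.2 ++ [""]))
      (d0, ls0)).2 = ls0 ++ R.map pvNorm
    ∧ (∀ c, c ≠ "" →
      (R.foldl
      (fun (st : PySem.Dict String (List Int) × List String) line =>
        if PySem.Str.strip line ≠ "" then
          (st.1.modify line [] (fun v => v ++ [((st.2 ++ [line]).length : Int) - 1]), st.2 ++ [line])
        else (st.1, st.2 ++ [""]))
      (d0, ls0)).1.getD c [] = d0.getD c [] ++ pvPos c (ls0.length) (R.map pvNorm))
    ∧ (R.foldl
      (fun (st : PySem.Dict String (List Int) × List String) line =>
        if PySem.Str.strip line ≠ "" then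
          (st.1.modify line [] (fun v => v ++ [((st.2 ++ [line]).length : Int) - 1]), st.2 ++ [line])
        else (st.1, st.2 ++ [""]))
      (d0, ls0)).1.keys = PySem.Set.update d0.keys (R.filter (fun l => PySem.Str.strip l != "")) := by
  induction R with
  | nil => intro d0 ls0; simp [pvPos, PySem.Set.update_nil]
  | cons line R ih =>
    intro d0 ls0
    have hlen1 : ∀ x : String, (((ls0 ++ [x]).length : Nat) : Int) = (ls0.length : Int) + 1 := by
      intro x; simp
    by_cases h : PySem.Str.strip line = ""
    · have hn : pvNorm line = "" := by simp [pvNorm, h]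
      simp only [List.foldl_cons, if_neg (not_not_intro h), List.map_cons, hn, List.filter_cons]
      obtain ⟨h1, h2, h3⟩ := ih d0 (ls0 ++ [""])
      refine ⟨by simpa using h1, fun c hc => ?_, by simpa [h] using h3⟩
      rw [h2 c hc, hlen1]
      simp only [pvPos, if_neg (Ne.symm hc), List.nil_append]
    · have hne : line ≠ "" := by rintro rfl; exact h rfl
      have hn : pvNorm line = line := by simp [pvNorm, h]
      simp only [List.foldl_cons, if_pos h, List.map_cons, hn, List.filter_cons]
      obtain ⟨h1, h2, h3⟩ := ih (d0.modify line [] (fun v => v ++ [((ls0 ++ [line]).length : Int) - 1])) (ls0 ++ [line])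
      refine ⟨by simpa using h1, fun c hc => ?_, ?_⟩
      · rw [h2 c hc, hlen1, PySem.Dict.getD_modify]
        simp only [pvPos]
        have he : (↑ls0.length + 1 - 1 : Int) = ↑ls0.length := by ring
        by_cases hcl : c = line
        · subst hcl
          simp [he]
        · simp only [if_neg hcl, if_neg (Ne.symm hcl), List.nil_append]
      · rw [h3, pv_keys_modify_add]
        simp [h, PySem.Set.update_cons]

theorem pv_mem_boilerF (threshold : Int) (wl : List String) (L : List (String × List Int)) :
    ∀ (s : PySem.Set Int) (x : Int),
    (x ∈ L.foldl (fun s p => if threshold ≤ (p.2.length : Int) ∧ (wl.any (fun pre => PySem.Str.startswith p.1 pre)) = false then PySem.Set.update s p.2 else s) s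
    ↔ x ∈ s ∨ ∃ p ∈ L, (threshold ≤ (p.2.length : Int) ∧ (wl.any (fun pre => PySem.Str.startswith p.1 pre)) = false) ∧ x ∈ p.2) := by
  induction L with
  | nil => simp
  | cons p L ih =>
    intro s x
    simp only [List.foldl_cons]
    split_ifs with hc
    · rw [ih, PySem.Set.mem_update]
      constructor
      · rintro ((h | h) | h)
        · exact .inl h
        · exact .inr ⟨p, by simp, hc, h⟩
        · obtain ⟨q, hq, h⟩ := h; exact .inr ⟨q, by simp [hq], h⟩
      · rintro (h | ⟨q, hq, h⟩)
        · exact .inl (.inl h)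
        · rcases List.mem_cons.1 hq with rfl | hq
          · exact .inl (.inr h.2)
          · exact .inr ⟨q, hq, h⟩
    · rw [ih]
      constructor
      · rintro (h | ⟨q, hq, h⟩)
        · exact .inl h
        · exact .inr ⟨q, by simp [hq], h⟩
      · rintro (h | ⟨q, hq, h⟩)
        · exact .inl h
        · rcases List.mem_cons.1 hq with rfl | hq
          · exact absurd h.1 hc
          · exact .inr ⟨q, hq, h⟩

def pvQ' (N : List String) (threshold : Int) (wl : List String) (l : String) : Bool :=
  (l != "") && (decide (threshold ≤ (N.count l : Int))) && !(wl.any (fun pre => PySem.Str.startswith l pre))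

theorem pv_boiler_iff (R : List String) (threshold : Int) (wl : List String) (x : Int) :
    (x ∈ ((R.foldl
      (fun (st : PySem.Dict String (List Int) × List String) line =>
        if PySem.Str.strip line ≠ "" then
          (st.1.modify line [] (fun v => v ++ [((st.2 ++ [line]).length : Int) - 1]), st.2 ++ [line])
        else (st.1, st.2 ++ [""]))
      (PySem.Dict.empty, [])).1.items.foldl
      (fun s p => if threshold ≤ (p.2.length : Int) ∧ (wl.any (fun pre => PySem.Str.startswith p.1 pre)) = false then PySem.Set.update s p.2 else s)
      PySem.Set.empty))
    ↔ ∃ k : Nat, k < (R.map pvNorm).length ∧ x = ↑k ∧ ∃ c, (R.map pvNorm)[k]? = some c ∧ pvQ' (R.map pvNorm) threshold wl c = true := by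
  obtain ⟨-, h2, h3⟩ := pv_foldA R PySem.Dict.empty []
  have hkeys : (R.foldl
      (fun (st : PySem.Dict String (List Int) × List String) line =>
        if PySem.Str.strip line ≠ "" then
          (st.1.modify line [] (fun v => v ++ [((st.2 ++ [line]).length : Int) - 1]), st.2 ++ [line])
        else (st.1, st.2 ++ [""]))
      (PySem.Dict.empty, [])).1.keys = PySem.Set.ofList (R.filter (fun l => PySem.Str.strip l != "")) := by
    rw [h3]; simp [PySem.Set.update_nil_left]
  have hnodup := hkeys ▸ PySem.Set.nodup_ofList (R.filter (fun l => PySem.Str.strip l != ""))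
  rw [pv_mem_boilerF, PySem.Dict.items_eq_map_keys _ hnodup [], hkeys]
  have hmem_nb : ∀ c, c ∈ R.filter (fun l => PySem.Str.strip l != "") → c ≠ "" := by
    intro c hcf
    have := (List.mem_filter.1 hcf).2
    intro e; subst e; simp at this; exact this rfl
  constructor
  · rintro (h | ⟨p, hp, hcond, hx⟩)
    · simp [PySem.Set.empty] at h
    · obtain ⟨c, hcS, rfl⟩ := List.mem_map.1 hp
      have hcnb := (PySem.Set.mem_ofList _ _).1 hcS
      have hc : c ≠ "" := hmem_nb c hcnb
      rw [h2 c hc] at hx hcond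
      simp only [PySem.Dict.getD_empty, List.length_nil, Nat.cast_zero, List.nil_append] at hx hcond
      obtain ⟨j, hj, hjc, hxj⟩ := (pvPos_mem c _ _ _).1 hx
      refine ⟨j, hj, by simpa using hxj, c, hjc, ?_⟩
      simp only [pvQ', Bool.and_eq_true, bne_iff_ne, ne_eq, Bool.not_eq_true']
      refine ⟨⟨by simpa using hc, ?_⟩, hcond.2⟩
      rw [pvPos_length] at hcond
      simpa using hcond.1
  · rintro ⟨k, hk, rfl, c, hkc, hq⟩
    simp only [pvQ', Bool.and_eq_true, bne_iff_ne, ne_eq, Bool.not_eq_true'] at hq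
    obtain ⟨⟨hc, hcount⟩, hwl⟩ := hq
    have hcnb : c ∈ R.filter (fun l => PySem.Str.strip l != "") := by
      rw [pv_filter_raw]
      exact List.mem_filter.2 ⟨List.mem_of_getElem? hkc, by simpa using hc⟩
    refine .inr ⟨(c, pvPos c 0 (R.map pvNorm)), ?_, ⟨?_, hwl⟩, ?_⟩
    · refine List.mem_map.2 ⟨c, (PySem.Set.mem_ofList _ _).2 hcnb, ?_⟩
      rw [h2 c hc]
      simp [PySem.Dict.getD_empty]
    · rw [pvPos_length]; simpa using hcount
    · exact (pvPos_mem c _ _ _).2 ⟨k, hk, hkc, by simp⟩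

theorem pv_filter_enum (S : PySem.Set Int) (Q : String → Bool) :
    ∀ (ys : List String) (n : Nat), (∀ (j : Nat) (c : String), j < ys.length → ys[j]? = some c → ((↑(n + j) : Int) ∈ S ↔ Q c = true)) →
    ((PySem.List.enumerate ys ↑n).filter (fun q => !(decide (q.1 ∈ S)))).map (fun q => q.2) = ys.filter (fun l => !(Q l)) := by
  intro ys
  induction ys with
  | nil => intro n h; simp [PySem.List.enumerate_nil]
  | cons y ys ih =>
    intro n h
    rw [PySem.List.enumerate_cons]
    have h0 : ((n : Int) ∈ S ↔ Q y = true) := by simpa using h 0 y (by simp) (by simp)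
    have hrec : ((PySem.List.enumerate ys ((n : Int) + 1)).filter (fun q => !(decide (q.1 ∈ S)))).map (fun q => q.2) = ys.filter (fun l => !(Q l)) := by
      have hcast : ((n : Int) + 1) = ((n + 1 : Nat) : Int) := by push_cast; ring
      rw [hcast]
      exact ih (n + 1) (fun j c hj hc => by
        have := h (j + 1) c (by simpa using hj) (by simpa using hc)
        rwa [show n + (j + 1) = n + 1 + j by ring] at this)
    simp only [List.filter_cons]
    by_cases hy : Q y = true
    · have hm : ((n : Int) ∈ S) := h0.2 hy
      simp [hy, hm, hrec]
    · have hm : ¬((n : Int) ∈ S) := fun m => hy (h0.1 m)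
      simp [hy, hm, hrec]

def pvCol : Nat → List String → List String
  | _, [] => []
  | b, x :: xs => if x = "" then (if b < 2 then [""] else []) ++ pvCol (b + 1) xs else x :: pvCol 0 xs

theorem pvTB_take_succ (m : List String) (n : Nat) (hn : n < m.length) :
    pvTB (m.take (n + 1)) = if m[n]? = some "" then pvTB (m.take n) + 1 else 0 := by
  have hg : m[n]? = some m[n] := List.getElem?_eq_getElem hn
  rw [List.take_succ, hg]
  simp only [Option.toList_some]
  rw [pvTB_append]
  by_cases hb : m[n] = ""
  · simp [hb, hg]
  · rw [if_neg hb, if_neg (by simp [hg, hb])]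

theorem pvTB_take_le (m : List String) (n : Nat) : pvTB (m.take n) ≤ n := by
  calc pvTB (m.take n) ≤ (m.take n).length := pvTB_le_length _
  _ ≤ n := by simp [List.length_take]

theorem pv_tb_mid (m : List String) : ∀ (n k : Nat), n ≤ m.length → n - pvTB (m.take n) ≤ k → k < n →
    m[k]? = some "" ∧ pvTB (m.take k) + (n - k) = pvTB (m.take n) := by
  intro n
  induction n with
  | zero => intro k _ _ hk; omega
  | succ n ih =>
    intro k hn h1 hk
    have hn' : n < m.length := by omega
    have hs := pvTB_take_succ m n hn'
    by_cases hb : m[n]? = some ""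
    · rw [if_pos hb] at hs
      rcases Nat.lt_succ_iff_lt_or_eq.1 hk with hkn | rfl
      · have ht := pvTB_take_le m n
        obtain ⟨hbk, htb⟩ := ih k (by omega) (by omega) hkn
        exact ⟨hbk, by omega⟩
      · exact ⟨hb, by omega⟩
    · rw [if_neg hb] at hs
      omega

theorem pv_close (m : List String) (n : Nat) (hn : n ≤ m.length) (E : PySem.Set Int) (s : Int)
    (hs : s = if pvTB (m.take n) = 0 then -1 else ((n - pvTB (m.take n) : Nat) : Int))
    (hE : ∀ x : Int, x ∈ E ↔ ∃ k : Nat, x = ↑k ∧ k < n - pvTB (m.take n) ∧ m[k]? = some "" ∧ 2 ≤ pvTB (m.take k)) :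
    ∀ x : Int, (x ∈ (if 0 ≤ s ∧ 2 < (n : Int) - s then PySem.Set.update E (PySem.List.pyRange (s + 2) (n : Int) 1) else E)) ↔
    ∃ k : Nat, x = ↑k ∧ k < n ∧ m[k]? = some "" ∧ 2 ≤ pvTB (m.take k) := by
  intro x
  set t := pvTB (m.take n) with hts
  have htn : t ≤ n := pvTB_take_le m n
  by_cases ht0 : t = 0
  · rw [hs, if_pos ht0, if_neg (by norm_num)]
    rw [hE]
    constructor
    · rintro ⟨k, rfl, hk, hb, htb⟩; exact ⟨k, rfl, by omega, hb, htb⟩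
    · rintro ⟨k, rfl, hk, hb, htb⟩
      refine ⟨k, rfl, ?_, hb, htb⟩
      by_contra hge
      have hkn : n - t ≤ k := by omega
      obtain ⟨-, htb2⟩ := pv_tb_mid m n k hn hkn hk
      omega
  · rw [hs, if_neg ht0]
    have hcond : ((0:Int) ≤ ((n - t : Nat) : Int) ∧ 2 < (n : Int) - ((n - t : Nat) : Int)) ↔ 2 < t := by
      constructor
      · rintro ⟨-, h⟩; omega
      · intro h; constructor <;> omega
    by_cases h2t : 2 < t
    · rw [if_pos (hcond.2 h2t), PySem.Set.mem_update, hE, PySem.List.mem_pyRange_one]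
      constructor
      · rintro (⟨k, rfl, hk, hb, htb⟩ | ⟨hlo, hhi⟩)
        · exact ⟨k, rfl, by omega, hb, htb⟩
        · have hx0 : 0 ≤ x := by omega
          obtain ⟨k, rfl⟩ : ∃ k : Nat, x = (k : Int) := ⟨x.toNat, by omega⟩
          have hk1 : n - t ≤ k := by omega
          have hk2 : k < n := by omega
          obtain ⟨hb, htb⟩ := pv_tb_mid m n k hn hk1 hk2
          exact ⟨k, rfl, hk2, hb, by omega⟩
      · rintro ⟨k, rfl, hk, hb, htb⟩
        by_cases hko : k < n - t
        · exact .inl ⟨k, rfl, hko, hb, htb⟩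
        · obtain ⟨-, htb2⟩ := pv_tb_mid m n k hn (by omega) hk
          exact .inr ⟨by omega, by omega⟩
    · rw [if_neg (fun hc => h2t (hcond.1 hc)), hE]
      constructor
      · rintro ⟨k, rfl, hk, hb, htb⟩; exact ⟨k, rfl, by omega, hb, htb⟩
      · rintro ⟨k, rfl, hk, hb, htb⟩
        refine ⟨k, rfl, ?_, hb, htb⟩
        by_contra hge
        obtain ⟨-, htb2⟩ := pv_tb_mid m n k hn (by omega) hk
        omega

theorem pv_scan (m : List String) : ∀ (ys : List String) (n : Nat) (E : PySem.Set Int) (s : Int),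
    n ≤ m.length → ys = m.drop n →
    (s = if pvTB (m.take n) = 0 then -1 else ((n - pvTB (m.take n) : Nat) : Int)) →
    (∀ x : Int, x ∈ E ↔ ∃ k : Nat, x = ↑k ∧ k < n - pvTB (m.take n) ∧ m[k]? = some "" ∧ 2 ≤ pvTB (m.take k)) →
    (((PySem.List.enumerate ys ↑n).foldl
      (fun (st : PySem.Set Int × Int) q =>
        if q.2 ≠ "" then
          ((if 0 ≤ st.2 ∧ 2 < q.1 - st.2 then PySem.Set.update st.1 (PySem.List.pyRange (st.2 + 2) q.1 1) else st.1), -1)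
        else (st.1, if st.2 < 0 then q.1 else st.2))
      (E, s)).2 = (if pvTB m = 0 then -1 else ((m.length - pvTB m : Nat) : Int)))
    ∧ (∀ x : Int, x ∈ ((PySem.List.enumerate ys ↑n).foldl
      (fun (st : PySem.Set Int × Int) q =>
        if q.2 ≠ "" then
          ((if 0 ≤ st.2 ∧ 2 < q.1 - st.2 then PySem.Set.update st.1 (PySem.List.pyRange (st.2 + 2) q.1 1) else st.1), -1)
        else (st.1, if st.2 < 0 then q.1 else st.2))
      (E, s)).1 ↔ ∃ k : Nat, x = ↑k ∧ k < m.length - pvTB (m.take (m.length)) ∧ m[k]? = some "" ∧ 2 ≤ pvTB (m.take k)) := by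
  intro ys
  induction ys with
  | nil =>
    intro n E s hn hys hs hE
    have hnl : n = m.length := by
      have := congrArg List.length hys
      simp [List.length_drop] at this
      omega
    subst hnl
    rw [PySem.List.enumerate_nil]
    simp only [List.foldl_nil]
    refine ⟨?_, ?_⟩
    · rw [hs, List.take_length]
    · intro x; rw [hE]
  | cons y ys ih =>
    intro n E s hn hys hs hE
    have hnlt : n < m.length := by
      by_contra hge
      rw [List.drop_eq_nil_of_le (by omega)] at hys
      exact List.cons_ne_nil y ys hys
    have hdrop : m.drop n = m[n] :: m.drop (n + 1) := List.drop_eq_getElem_cons hnlt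
    rw [← hys] at hdrop
    injection hdrop with hy hys'
    have hgn : m[n]? = some m[n] := List.getElem?_eq_getElem hnlt
    rw [PySem.List.enumerate_cons]
    simp only [List.foldl_cons]
    have htsucc := pvTB_take_succ m n hnlt
    by_cases hb : m[n] = ""
    · -- blank step
      rw [if_pos (by simp [hgn, hb])] at htsucc
      have hstep : (if y ≠ "" then
          ((if 0 ≤ s ∧ 2 < (↑n : Int) - s then PySem.Set.update E (PySem.List.pyRange (s + 2) (↑n : Int) 1) else E), -1)
          else (E, if s < 0 then (↑n : Int) else s)) = (E, if s < 0 then (↑n : Int) else s) := by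
        rw [if_neg (by simp [hy, hb])]
      rw [hstep]
      have hcast : ((↑n : Int) + 1) = ((n + 1 : Nat) : Int) := by push_cast; ring
      rw [hcast]
      apply ih (n + 1) E _ (by omega) hys'
      · rw [htsucc]
        set t := pvTB (m.take n)
        have htn : t ≤ n := pvTB_take_le m n
        by_cases ht0 : t = 0
        · rw [hs, if_pos ht0]
          rw [if_pos (by norm_num : (-1:Int) < 0), if_neg (by omega)]
          congr 1; omega
        · rw [hs, if_neg ht0]
          rw [if_neg (by omega : ¬ ((((n - t : Nat) : Int)) < 0)), if_neg (by omega)]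
          congr 1; omega
      · intro x
        rw [hE, htsucc]
        have htn : pvTB (m.take n) ≤ n := pvTB_take_le m n
        constructor
        · rintro ⟨k, rfl, hk, hbk, htbk⟩; exact ⟨k, rfl, by omega, hbk, htbk⟩
        · rintro ⟨k, rfl, hk, hbk, htbk⟩; exact ⟨k, rfl, by omega, hbk, htbk⟩
    · -- non-blank step
      rw [if_neg (by simp [hgn, hb])] at htsucc
      have hstep : (if y ≠ "" then
          ((if 0 ≤ s ∧ 2 < (↑n : Int) - s then PySem.Set.update E (PySem.List.pyRange (s + 2) (↑n : Int) 1) else E), -1)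
          else (E, if s < 0 then (↑n : Int) else s)) =
          ((if 0 ≤ s ∧ 2 < (↑n : Int) - s then PySem.Set.update E (PySem.List.pyRange (s + 2) (↑n : Int) 1) else E), -1) := by
        rw [if_pos (by simp [hy, hb])]
      rw [hstep]
      have hcast : ((↑n : Int) + 1) = ((n + 1 : Nat) : Int) := by push_cast; ring
      rw [hcast]
      apply ih (n + 1) _ _ (by omega) hys'
      · rw [htsucc]; simp
      · intro x
        rw [pv_close m n (by omega) E s hs hE x, htsucc]
        constructor
        · rintro ⟨k, rfl, hk, hbk, htbk⟩; exact ⟨k, rfl, by omega, hbk, htbk⟩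
        · rintro ⟨k, rfl, hk, hbk, htbk⟩
          refine ⟨k, rfl, ?_, hbk, htbk⟩
          rcases Nat.lt_succ_iff_lt_or_eq.1 (by omega : k < n + 1) with h | rfl
          · exact h
          · rw [hgn] at hbk; simp [hb] at hbk

theorem pvCol_cons_blank (b : Nat) (xs : List String) :
    pvCol b ("" :: xs) = (if b < 2 then [""] else []) ++ pvCol (b + 1) xs := by
  simp [pvCol]

theorem pvCol_cons_ne (b : Nat) (x : String) (xs : List String) (h : x ≠ "") :
    pvCol b (x :: xs) = x :: pvCol 0 xs := by
  simp only [pvCol]; rw [if_neg h]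

theorem pv_colE (m : List String) (Efin : PySem.Set Int)
    (hE : ∀ x : Int, x ∈ Efin ↔ ∃ k : Nat, x = ↑k ∧ k < m.length ∧ m[k]? = some "" ∧ 2 ≤ pvTB (m.take k)) :
    ∀ (ys : List String) (n : Nat), n ≤ m.length → ys = m.drop n →
    ((PySem.List.enumerate ys ↑n).filter (fun q => !(decide (q.1 ∈ Efin)))).map (fun q => q.2) = pvCol (pvTB (m.take n)) ys := by
  intro ys
  induction ys with
  | nil => intro n _ _; simp [PySem.List.enumerate_nil, pvCol]
  | cons y ys ih =>
    intro n hn hys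
    have hnlt : n < m.length := by
      by_contra hge
      rw [List.drop_eq_nil_of_le (by omega)] at hys
      exact List.cons_ne_nil y ys hys
    have hdrop : m.drop n = m[n] :: m.drop (n + 1) := List.drop_eq_getElem_cons hnlt
    rw [← hys] at hdrop
    injection hdrop with hy hys'
    have hgn : m[n]? = some m[n] := List.getElem?_eq_getElem hnlt
    have htsucc := pvTB_take_succ m n hnlt
    rw [PySem.List.enumerate_cons]
    have hcast : ((↑n : Int) + 1) = ((n + 1 : Nat) : Int) := by push_cast; ring
    have hrec := ih (n + 1) (by omega) hys'
    by_cases hb : m[n] = ""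
    · have hy0 : y = "" := by rw [hy, hb]
      rw [if_pos (by rw [hgn, hb])] at htsucc
      subst hy0
      rw [pvCol_cons_blank]
      by_cases h2 : 2 ≤ pvTB (m.take n)
      · have hmem : ((n : Int) ∈ Efin) := (hE _).2 ⟨n, rfl, hnlt, by rw [hgn, hb], h2⟩
        rw [List.filter_cons_of_neg (by simp [hmem])]
        rw [hcast, hrec, htsucc, if_neg (by omega), List.nil_append]
      · have hmem : ¬ ((n : Int) ∈ Efin) := by
          rw [hE]
          rintro ⟨k, hk, -, -, htbk⟩
          have : k = n := by omega
          subst this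
          omega
        rw [List.filter_cons_of_pos (by simp [hmem])]
        simp only [List.map_cons]
        rw [hcast, hrec, htsucc, if_pos (by omega)]
        rfl
    · have hmem : ¬ ((n : Int) ∈ Efin) := by
        rw [hE]
        rintro ⟨k, hk, -, hbk, -⟩
        have : k = n := by omega
        subst this
        rw [hgn] at hbk; simp [hb] at hbk
      rw [List.filter_cons_of_pos (by simp [hmem])]
      simp only [List.map_cons]
      rw [if_neg (by rw [hgn]; simp [hb])] at htsucc
      rw [hcast, hrec, htsucc, pvCol_cons_ne _ _ _ (by rw [hy]; exact hb)]

theorem pv_foldB (threshold : Int) (wl : List String) (R : List String) :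
    ∀ (xs : List String) (out0 : List String) (b : Nat),
    (xs.foldl
      (fun (st : List String × Nat) line =>
        if PySem.Str.strip line = "" then
          ((if st.2 < 2 then st.1 ++ [""] else st.1), st.2 + 1)
        else if threshold ≤ (PySem.Dict.counter (R.filter (fun l => PySem.Str.strip l != ""))).getD line 0 ∧ (wl.any (fun pre => PySem.Str.startswith line pre)) = false then
          st
        else (st.1 ++ [line], 0))
      (out0, b)).1 = out0 ++ pvCol b ((xs.map pvNorm).filter (fun l => !(pvQ' (R.map pvNorm) threshold wl l))) := by
  intro xs
  induction xs with
  | nil => intro out0 b; simp [pvCol]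
  | cons line xs ih =>
    intro out0 b
    simp only [List.foldl_cons, List.map_cons]
    by_cases h : PySem.Str.strip line = ""
    · have hn : pvNorm line = "" := by simp [pvNorm, h]
      have hq : pvQ' (R.map pvNorm) threshold wl "" = false := by simp [pvQ']
      rw [if_pos h, hn, List.filter_cons_of_pos (by rw [hq]; rfl), pvCol_cons_blank, ih]
      by_cases hb : b < 2
      · rw [if_pos hb, if_pos hb]
        simp
      · rw [if_neg hb, if_neg hb]
        simp
    · have hne : line ≠ "" := by rintro rfl; exact h rfl
      have hn : pvNorm line = line := by simp [pvNorm, h]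
      rw [if_neg h, hn]
      have hcount : (PySem.Dict.counter (R.filter (fun l => PySem.Str.strip l != ""))).getD line 0 = ((R.map pvNorm).count line : Int) := by
        rw [PySem.Dict.getD_counter]
        norm_cast
        exact pv_count_filter R line hne
      by_cases hcond : threshold ≤ ((R.map pvNorm).count line : Int) ∧ (wl.any (fun pre => PySem.Str.startswith line pre)) = false
      · have hq : pvQ' (R.map pvNorm) threshold wl line = true := by
          simp only [pvQ', Bool.and_eq_true, bne_iff_ne, ne_eq, Bool.not_eq_true']
          exact ⟨⟨hne, decide_eq_true hcond.1⟩, hcond.2⟩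
        rw [if_pos (by rw [hcount]; exact hcond), List.filter_cons_of_neg (by simp [hq])]
        exact ih out0 b
      · have hq : pvQ' (R.map pvNorm) threshold wl line = false := by
          rw [pvQ']
          rcases not_and_or.1 hcond with h1 | h2
          · have hd : decide (threshold ≤ ((R.map pvNorm).count line : Int)) = false := decide_eq_false h1
            simp [hd]
          · have hw : wl.any (fun pre => PySem.Str.startswith line pre) = true := by
              cases hx : wl.any (fun pre => PySem.Str.startswith line pre)
              · exact absurd hx h2
              · rfl
            rw [hw]
            simp
        rw [if_neg (by rw [hcount]; exact hcond), List.filter_cons_of_pos (by rw [hq]; rfl)]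
        rw [ih, pvCol_cons_ne _ _ _ hne]
        simp

theorem pv_contains_eq (s : PySem.Set Int) (x : Int) : PySem.Set.contains s x = decide (x ∈ s) := by
  by_cases h : x ∈ s
  · simp [h, (PySem.Set.contains_iff s x).2 h]
  · have hc : PySem.Set.contains s x = false := by
      rw [← Bool.not_eq_true, PySem.Set.contains_iff]; exact h
    simp [h, hc]

theorem pv_main (contents : String) (threshold : Int) (whitelist_prefixes : List String) :
    remove_duplicated_lines contents threshold whitelist_prefixes = remove_duplicated_lines_alt contents threshold whitelist_prefixes := by
  simp only [remove_duplicated_lines, remove_duplicated_lines_alt, pv_contains_eq]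
  congr 1
  -- abbreviations
  set R := (PySem.Str.split? contents "\n").getD [] with hRdef
  -- A side: the first fold's line list is the normalised lines
  have hA2 := (pv_foldA R PySem.Dict.empty []).1
  rw [List.nil_append] at hA2
  rw [hA2]
  -- A side: boilerplate filter = content filter
  have hfilt : ((PySem.List.enumerate (R.map pvNorm) ((0 : Nat) : Int)).filter
      (fun q => !(decide (q.1 ∈ ((R.foldl
      (fun (st : PySem.Dict String (List Int) × List String) line =>
        if PySem.Str.strip line ≠ "" then
          (st.1.modify line [] (fun v => v ++ [((st.2 ++ [line]).length : Int) - 1]), st.2 ++ [line])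
        else (st.1, st.2 ++ [""]))
      (PySem.Dict.empty, [])).1.items.foldl
      (fun s p => if threshold ≤ (p.2.length : Int) ∧ (whitelist_prefixes.any (fun pre => PySem.Str.startswith p.1 pre)) = false then PySem.Set.update s p.2 else s)
      PySem.Set.empty))))).map (fun q => q.2)
      = (R.map pvNorm).filter (fun l => !(pvQ' (R.map pvNorm) threshold whitelist_prefixes l)) := by
    apply pv_filter_enum
    intro j c hj hc
    rw [pv_boiler_iff R threshold whitelist_prefixes]
    constructor
    · rintro ⟨k, hk, hjk, c', hkc', hq⟩
      have : j = k := by omega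
      subst this
      rw [hc] at hkc'
      injection hkc' with e
      rw [e]; exact hq
    · intro hq
      exact ⟨j, hj, by norm_num, c, hc, hq⟩
  simp only [Nat.cast_zero] at hfilt
  rw [hfilt]
  set M := (R.map pvNorm).filter (fun l => !(pvQ' (R.map pvNorm) threshold whitelist_prefixes l)) with hMdef
  -- A side: blank-collapse scan
  obtain ⟨hs2, hE2⟩ := pv_scan M M 0 PySem.Set.empty (-1) (by simp) (by simp)
    (by simp [pvTB]) (by intro x; simp [pvTB, PySem.Set.empty])
  have hEfin := pv_close M M.length (le_refl _)
      ((PySem.List.enumerate M ((0:Nat) : Int)).foldl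
      (fun (st : PySem.Set Int × Int) q =>
        if q.2 ≠ "" then
          ((if 0 ≤ st.2 ∧ 2 < q.1 - st.2 then PySem.Set.update st.1 (PySem.List.pyRange (st.2 + 2) q.1 1) else st.1), -1)
        else (st.1, if st.2 < 0 then q.1 else st.2))
      (PySem.Set.empty, -1)).1
      ((PySem.List.enumerate M ((0:Nat) : Int)).foldl
      (fun (st : PySem.Set Int × Int) q =>
        if q.2 ≠ "" then
          ((if 0 ≤ st.2 ∧ 2 < q.1 - st.2 then PySem.Set.update st.1 (PySem.List.pyRange (st.2 + 2) q.1 1) else st.1), -1)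
        else (st.1, if st.2 < 0 then q.1 else st.2))
      (PySem.Set.empty, -1)).2
      (by rw [List.take_length]; exact hs2) hE2
  have hcol := pv_colE M _ hEfin M 0 (by simp) (by simp)
  simp only [List.take_zero] at hcol
  rw [show pvTB [] = 0 from rfl] at hcol
  simp only [Nat.cast_zero] at hcol
  rw [hcol]
  -- B side
  have hB := pv_foldB threshold whitelist_prefixes R R [] 0
  rw [hB, List.nil_append]

-- ===== VERDICT (by name: the statement is the Claim_ definition above) =====
theorem remove_duplicated_lines_spec : Claim_equal_remove_duplicated_lines := by
  intro contents threshold whitelist_prefixes _ _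
  unfold Spec_remove_duplicated_lines
  exact pv_main contents threshold whitelist_prefixes
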